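-- pv_equiv track=rewrite | github.com/RyoSpiralArchitect/sr_rewind_cot | sr_rewind_cot.py | strip_markdown_code_fence
-- ===== SOURCE A (Python) =====
-- def strip_markdown_code_fence(text: str) -> str:
--     raw = str(text or "").strip()
--     if not raw.startswith("```"):
--         return raw
--     lines = raw.splitlines()
--     if lines and lines[0].lstrip().startswith("```"):
--         lines = lines[1:]
--     while lines and not lines[-1].strip():
--         lines.pop()
--     if lines and lines[-1].strip().startswith("```"):
--         lines = lines[:-1]
--     return "\n".join(lines).strip()
-- ===== SOURCE B (Python) =====
-- def _trim_leading_blanks(rev):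
--     if rev and not rev[0].strip():
--         return _trim_leading_blanks(rev[1:])
--     return rev
--
--
-- def strip_markdown_code_fence(text: str) -> str:
--     raw = str(text or "").strip()
--     if not raw.startswith("```"):
--         return raw
--     rev = _trim_leading_blanks(raw.splitlines()[1:][::-1])
--     if rev and rev[0].strip().startswith("```"):
--         rev = rev[1:]
--     return "\n".join(reversed(rev)).strip()
-- ===== Notes on version B (the rewrite author's own statement) =====
-- stated objective: alternative
-- what changed: Replaces A's line-list mutation (conditional first-line drop, destructive while-pop of trailing blank lines from the end, slice off the closing fence) with a reversed-tail pipeline: B reverses the tail lines once, recursively trims leading blanks, drops the closing fence at the head, and joins the re-reversed list.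
import Mathlib
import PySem

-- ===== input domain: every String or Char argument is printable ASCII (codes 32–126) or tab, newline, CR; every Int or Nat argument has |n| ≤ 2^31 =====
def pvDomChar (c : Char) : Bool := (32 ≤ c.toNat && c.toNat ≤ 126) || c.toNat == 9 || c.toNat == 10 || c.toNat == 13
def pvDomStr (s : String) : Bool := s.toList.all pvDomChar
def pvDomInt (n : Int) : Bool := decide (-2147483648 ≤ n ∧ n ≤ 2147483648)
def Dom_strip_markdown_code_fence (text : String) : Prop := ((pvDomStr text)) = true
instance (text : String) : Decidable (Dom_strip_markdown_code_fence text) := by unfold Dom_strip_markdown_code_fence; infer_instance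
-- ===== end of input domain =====

-- B strips the fence by reversing the tail lines and recursively dropping leading blanks,
-- instead of A's in-place while-pop from the end of a mutated line list (objective: alternative).

-- ===== PORT A =====
-- while lines and not lines[-1].strip(): lines.pop()
def pvPopTrailingBlanks (ls : List String) : List String :=
  if h : ls ≠ [] then
    if PySem.Str.strip (ls.getLast h) = "" then pvPopTrailingBlanks ls.dropLast else ls
  else ls
termination_by ls.length
decreasing_by
  have := List.length_pos_iff.mpr h
  simp [List.length_dropLast]; omega

def strip_markdown_code_fence (text : String) : String :=
  let raw := PySem.Str.strip (if text = "" then "" else text)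
  if !(PySem.Str.startswith raw "```") then raw
  else
    let lines := PySem.Str.splitlines raw
    -- if lines and lines[0].lstrip().startswith("```"): lines = lines[1:]
    let lines1 := match lines with
      | [] => []
      | l0 :: rest =>
          if PySem.Str.startswith (PySem.Str.lstrip l0) "```" then rest else l0 :: rest
    let lines2 := pvPopTrailingBlanks lines1
    -- if lines and lines[-1].strip().startswith("```"): lines = lines[:-1]
    let lines3 := match lines2.getLast? with
      | some l =>
          if PySem.Str.startswith (PySem.Str.strip l) "```" then lines2.dropLast else lines2
      | none => lines2
    PySem.Str.strip (PySem.Str.join "\n" lines3)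

-- ===== PORT B =====
-- def _trim_leading_blanks(rev): recursive drop of blank lines from the front
def pvTrimLeadingBlanks : List String → List String
  | [] => []
  | l :: rest => if PySem.Str.strip l = "" then pvTrimLeadingBlanks rest else l :: rest

def strip_markdown_code_fence_alt (text : String) : String :=
  let raw := PySem.Str.strip (if text = "" then "" else text)
  if !(PySem.Str.startswith raw "```") then raw
  else
    -- raw.splitlines()[1:][::-1]
    let rev := pvTrimLeadingBlanks
      ((PySem.List.slice (PySem.Str.splitlines raw) (some 1) none).reverse)
    -- if rev and rev[0].strip().startswith("```"): rev = rev[1:]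
    let rev1 := match rev with
      | [] => []
      | l :: rest =>
          if PySem.Str.startswith (PySem.Str.strip l) "```" then rest else l :: rest
    PySem.Str.strip (PySem.Str.join "\n" rev1.reverse)

-- ===== PRECONDITION & SPEC =====
def Spec_strip_markdown_code_fence (text : String) (out : String) : Prop := out = strip_markdown_code_fence_alt text
instance (text : String) (out : String) : Decidable (Spec_strip_markdown_code_fence text out) := by unfold Spec_strip_markdown_code_fence; infer_instance

-- ===== CLAIM (what is proved, stated in full; the proofs are below) =====
def Claim_equal_strip_markdown_code_fence : Prop := ∀ (text : String), Dom_strip_markdown_code_fence text → Spec_strip_markdown_code_fence text (strip_markdown_code_fence text)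

-- ===== LEMMAS AND PROOFS =====

-- the accumulator of splitlines.go distributes over appending
lemma pv_go_acc (isB : Char → Bool) (s cur : List Char) (acc : List (List Char)) :
    ∀ (acc₂ : List (List Char)), PySem.Chars.splitlines.go isB s cur (acc ++ acc₂)
      = acc₂.reverse ++ PySem.Chars.splitlines.go isB s cur acc := by
  induction s, cur, acc using PySem.Chars.splitlines.go.induct isB with
  | case1 cur acc hcur => intro acc₂; simp [PySem.Chars.splitlines.go, hcur]
  | case2 cur acc hcur => intro acc₂; simp [PySem.Chars.splitlines.go, hcur]
  | case3 rest cur acc ih => intro acc₂; simpa [PySem.Chars.splitlines.go] using ih acc₂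
  | case4 c rest cur acc hne hB ih =>
      intro acc₂; simp [PySem.Chars.splitlines.go, hB]; simpa using ih acc₂
  | case5 c rest cur acc hne hB ih =>
      intro acc₂; simp [PySem.Chars.splitlines.go, hB]; exact ih acc₂

lemma pv_go_acc' (isB : Char → Bool) (s cur : List Char) (acc : List (List Char)) :
    PySem.Chars.splitlines.go isB s cur acc
      = acc.reverse ++ PySem.Chars.splitlines.go isB s cur [] := by
  simpa using pv_go_acc isB s cur [] acc

-- with a pending nonempty current line, the first emitted line extends it
lemma pv_go_head (isB : Char → Bool) (s cur : List Char) (acc : List (List Char)) :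
    cur ≠ [] → ∃ w rest, PySem.Chars.splitlines.go isB s cur acc
      = acc.reverse ++ ((cur.reverse ++ w) :: rest) := by
  induction s, cur, acc using PySem.Chars.splitlines.go.induct isB with
  | case1 cur acc hcur => intro h; exact absurd (List.isEmpty_iff.mp hcur) h
  | case2 cur acc hcur =>
      intro h; exact ⟨[], [], by simp [PySem.Chars.splitlines.go, hcur]⟩
  | case3 rest cur acc ih =>
      intro h
      refine ⟨[], PySem.Chars.splitlines.go isB rest [] [], ?_⟩
      simp [PySem.Chars.splitlines.go]
      simpa using pv_go_acc' isB rest [] (cur.reverse :: acc)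
  | case4 c rest cur acc hne hB ih =>
      intro h
      refine ⟨[], PySem.Chars.splitlines.go isB rest [] [], ?_⟩
      simp [PySem.Chars.splitlines.go, hB]
      simpa using pv_go_acc' isB rest [] (cur.reverse :: acc)
  | case5 c rest cur acc hne hB ih =>
      intro h
      obtain ⟨w, rest', hw⟩ := ih (by simp)
      exact ⟨[c] ++ w, rest', by simp [PySem.Chars.splitlines.go, hB, hw]⟩

-- splitlines of a string opening with ``` yields a first line opening with ```
lemma pv_splitlines_fence (t : List Char) :
    ∃ w rest, PySem.Chars.splitlines ('`' :: '`' :: '`' :: t)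
      = ('`' :: '`' :: '`' :: w) :: rest := by
  unfold PySem.Chars.splitlines
  simp [PySem.Chars.splitlines.go]
  obtain ⟨w, rest, hw⟩ := pv_go_head _ t ['`', '`', '`'] [] (by simp)
  rw [hw]
  exact ⟨w, rest, by simp⟩

-- A's backward while-pop is B's forward trim of the reversed list
lemma pv_pop_eq_trim_rev (rs : List String) :
    pvPopTrailingBlanks rs.reverse = (pvTrimLeadingBlanks rs).reverse := by
  induction rs with
  | nil => rw [pvPopTrailingBlanks]; simp [pvTrimLeadingBlanks]
  | cons a rest ih =>
      rw [pvPopTrailingBlanks, pvTrimLeadingBlanks]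
      have hne : (a :: rest).reverse ≠ [] := by simp
      rw [dif_pos hne]
      have hlast : (a :: rest).reverse.getLast hne = a := by
        simp [List.reverse_cons]
      rw [hlast]
      by_cases hb : PySem.Str.strip a = ""
      · simp [hb, List.reverse_cons, ih]
      · simp [hb]

lemma pv_pop_eq (ls : List String) :
    pvPopTrailingBlanks ls = (pvTrimLeadingBlanks ls.reverse).reverse := by
  simpa using pv_pop_eq_trim_rev ls.reverse

-- ===== VERDICT (by name: the statement is the Claim_ definition above) =====
theorem strip_markdown_code_fence_spec : Claim_equal_strip_markdown_code_fence := by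
  intro text _
  unfold Spec_strip_markdown_code_fence strip_markdown_code_fence strip_markdown_code_fence_alt
  set raw := PySem.Str.strip (if text = "" then "" else text) with hraw
  have h3 : "```".toList = ['`', '`', '`'] := rfl
  by_cases hg : PySem.Chars.startswith raw.toList ['`', '`', '`'] = true
  case neg => simp [PySem.Str.startswith, h3, hg]
  case pos =>
    simp only [PySem.Str.startswith, h3, hg, Bool.not_true, Bool.false_eq_true, if_false]
    obtain ⟨t, ht⟩ : ∃ t, raw.toList = '`' :: '`' :: '`' :: t := by
      obtain ⟨t, h⟩ := (PySem.Chars.startswith_iff raw.toList ['`', '`', '`']).mp hg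
      exact ⟨t, by simpa using h.symm⟩
    obtain ⟨w, rest, hsplit⟩ := pv_splitlines_fence t
    have hlines : PySem.Str.splitlines raw
        = String.ofList ('`' :: '`' :: '`' :: w) :: rest.map String.ofList := by
      rw [PySem.Str.splitlines, ht, hsplit]; simp
    have hfence : PySem.Chars.startswith
        (PySem.Str.lstrip (String.ofList ('`' :: '`' :: '`' :: w))).toList ['`', '`', '`']
          = true := by
      have h96 : PySem.Chars.isspace '`' = false := by decide
      simp [PySem.Str.lstrip, PySem.Chars.lstrip, PySem.Chars.startswith, h96, List.isPrefixOf]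
    rw [hlines]
    simp only [hfence, if_true, PySem.List.slice_from_one, List.tail_cons]
    rw [pv_pop_eq (rest.map String.ofList)]
    set rev := pvTrimLeadingBlanks (rest.map String.ofList).reverse with hrev
    match hr : rev with
    | [] => simp
    | l :: rest' =>
        simp only [List.getLast?_reverse, List.head?_cons, List.dropLast_reverse, List.tail_cons]
        by_cases hf : PySem.Chars.startswith (PySem.Chars.strip l.toList) ['`', '`', '`'] = true <;>
          simp [hf]
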